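-- pv_equiv track=rewrite | github.com/minidu-lab/cybershield-oss | cybershield/ai/tutor.py | _apply_severity_colors
-- ===== SOURCE A (Python) =====
-- SEVERITY_COLORS = {
--     "CRITICAL": "\033[91m",  # Bright red
--     "HIGH": "\033[93m",      # Yellow/orange
--     "MEDIUM": "\033[33m",    # Dark yellow
--     "LOW": "\033[92m",       # Green
--     "INFO": "\033[94m",      # Blue
--     "RESET": "\033[0m",      # Reset
--     "BOLD": "\033[1m",       # Bold
--     "DIM": "\033[2m",        # Dim
-- }
--
-- def _apply_severity_colors(text: str) -> str:
--     """Apply ANSI color codes to severity keywords in the response.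
--
--     Makes CRITICAL appear in red, HIGH in orange/yellow, etc.
--     """
--     replacements = {
--         "CRITICAL": (
--             f"{SEVERITY_COLORS['BOLD']}{SEVERITY_COLORS['CRITICAL']}"
--             f"CRITICAL{SEVERITY_COLORS['RESET']}"
--         ),
--         "HIGH": (
--             f"{SEVERITY_COLORS['BOLD']}{SEVERITY_COLORS['HIGH']}"
--             f"HIGH{SEVERITY_COLORS['RESET']}"
--         ),
--         "MEDIUM": (
--             f"{SEVERITY_COLORS['MEDIUM']}"
--             f"MEDIUM{SEVERITY_COLORS['RESET']}"
--         ),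
--         "LOW": (
--             f"{SEVERITY_COLORS['LOW']}"
--             f"LOW{SEVERITY_COLORS['RESET']}"
--         ),
--     }
--     for keyword, colored in replacements.items():
--         # Only replace standalone severity words (not inside other words)
--         text = text.replace(
--             f"**{keyword}**", f"**{colored}**"
--         )
--         text = text.replace(
--             f"Severity: {keyword}", f"Severity: {colored}"
--         )
--     return text
-- ===== SOURCE B (Python) =====
-- SEVERITY_COLORS = {
--     "CRITICAL": "\033[91m",  # Bright red
--     "HIGH": "\033[93m",      # Yellow/orange
--     "MEDIUM": "\033[33m",    # Dark yellow
--     "LOW": "\033[92m",       # Green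
--     "INFO": "\033[94m",      # Blue
--     "RESET": "\033[0m",      # Reset
--     "BOLD": "\033[1m",       # Bold
--     "DIM": "\033[2m",        # Dim
-- }
--
--
-- def _apply_severity_colors(text: str) -> str:
--     """Apply ANSI color codes to severity keywords in the response.
--
--     One fused left-to-right scan per keyword (handling both the bold-marker
--     and the severity-prefix form in the same pass) instead of two
--     separate str.replace passes per keyword.
--     """
--     specs = [
--         ("CRITICAL", SEVERITY_COLORS["BOLD"] + SEVERITY_COLORS["CRITICAL"]),
--         ("HIGH", SEVERITY_COLORS["BOLD"] + SEVERITY_COLORS["HIGH"]),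
--         ("MEDIUM", SEVERITY_COLORS["MEDIUM"]),
--         ("LOW", SEVERITY_COLORS["LOW"]),
--     ]
--     for kw, color in specs:
--         colored = color + kw + SEVERITY_COLORS["RESET"]
--         bold_pat = "**" + kw + "**"
--         sev_pat = "Severity: " + kw
--         out = []
--         i = 0
--         n = len(text)
--         while i < n:
--             if text.startswith(bold_pat, i):
--                 out.append("**" + colored + "**")
--                 i += len(bold_pat)
--             elif text.startswith(sev_pat, i):
--                 out.append("Severity: " + colored)
--                 i += len(sev_pat)
--             else:
--                 out.append(text[i])
--                 i += 1
--         text = "".join(out)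
--     return text
-- ===== Notes on version B (the rewrite author's own statement) =====
-- stated objective: alternative
-- what changed: B fuses the two str.replace passes per keyword into one hand-written left-to-right scan per keyword that handles both the bold-marker form and the severity-prefix form of the keyword in a single traversal (4 passes over the text instead of 8), driven by a data table instead of per-keyword f-string literals.
import Mathlib
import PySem

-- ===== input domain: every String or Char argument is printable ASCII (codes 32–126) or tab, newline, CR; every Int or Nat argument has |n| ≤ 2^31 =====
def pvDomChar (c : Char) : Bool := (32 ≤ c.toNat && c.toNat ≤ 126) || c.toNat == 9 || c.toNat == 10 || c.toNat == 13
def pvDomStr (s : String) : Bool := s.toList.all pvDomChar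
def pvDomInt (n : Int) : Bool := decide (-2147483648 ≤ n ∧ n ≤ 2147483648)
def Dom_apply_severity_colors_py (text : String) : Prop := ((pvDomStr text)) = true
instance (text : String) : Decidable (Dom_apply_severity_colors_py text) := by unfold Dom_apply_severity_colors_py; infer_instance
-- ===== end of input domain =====

-- B fuses the two str.replace passes per keyword into ONE left-to-right scan per keyword that
-- handles both the bold-marker and the severity-prefix form of the keyword (4 passes instead
-- of 8); proved equal to A on every input (objective: alternative).

-- ===== PORT A =====
def pvSeverityColors : PySem.Dict String String := PySem.Dict.ofList
  [("CRITICAL", "\x1B[91m"), ("HIGH", "\x1B[93m"), ("MEDIUM", "\x1B[33m"),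
   ("LOW", "\x1B[92m"), ("INFO", "\x1B[94m"), ("RESET", "\x1B[0m"),
   ("BOLD", "\x1B[1m"), ("DIM", "\x1B[2m")]

def apply_severity_colors_py (text : String) : String :=
  let replacements : PySem.Dict String String := PySem.Dict.ofList
    [("CRITICAL", (pvSeverityColors.getD "BOLD" "") ++ (pvSeverityColors.getD "CRITICAL" "")
        ++ "CRITICAL" ++ (pvSeverityColors.getD "RESET" "")),
     ("HIGH", (pvSeverityColors.getD "BOLD" "") ++ (pvSeverityColors.getD "HIGH" "")
        ++ "HIGH" ++ (pvSeverityColors.getD "RESET" "")),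
     ("MEDIUM", (pvSeverityColors.getD "MEDIUM" "")
        ++ "MEDIUM" ++ (pvSeverityColors.getD "RESET" "")),
     ("LOW", (pvSeverityColors.getD "LOW" "")
        ++ "LOW" ++ (pvSeverityColors.getD "RESET" ""))]
  replacements.items.foldl (fun text kv =>
    let keyword := kv.1
    let colored := kv.2
    let text := PySem.Str.replace text ("**" ++ keyword ++ "**") ("**" ++ colored ++ "**")
    PySem.Str.replace text ("Severity: " ++ keyword) ("Severity: " ++ colored)) text

-- ===== PORT B =====
-- the fused per-keyword scan of Source B: one pass over the characters, checking the bold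
-- pattern first, then the severity-prefix pattern, else copying one character.
def pvScanGo (kw colored : List Char) : List Char → List Char
  | [] => []
  | c :: t =>
    if ('*' :: '*' :: (kw ++ ['*', '*'])).isPrefixOf (c :: t) then
      ('*' :: '*' :: (colored ++ ['*', '*'])) ++
        pvScanGo kw colored (List.drop ('*' :: '*' :: (kw ++ ['*', '*'])).length (c :: t))
    else if ('S' :: ("everity: ".toList ++ kw)).isPrefixOf (c :: t) then
      ("Severity: ".toList ++ colored) ++
        pvScanGo kw colored (List.drop ("Severity: ".toList ++ kw).length (c :: t))
    else c :: pvScanGo kw colored t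
  termination_by cs => cs.length
  decreasing_by
  all_goals (simp; try omega)

def apply_severity_colors_py_alt (text : String) : String :=
  let specs : List (String × String) :=
    [("CRITICAL", (pvSeverityColors.getD "BOLD" "") ++ (pvSeverityColors.getD "CRITICAL" "")),
     ("HIGH", (pvSeverityColors.getD "BOLD" "") ++ (pvSeverityColors.getD "HIGH" "")),
     ("MEDIUM", pvSeverityColors.getD "MEDIUM" ""),
     ("LOW", pvSeverityColors.getD "LOW" "")]
  specs.foldl (fun text kc =>
    let colored := kc.2 ++ kc.1 ++ (pvSeverityColors.getD "RESET" "")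
    String.ofList (pvScanGo kc.1.toList colored.toList text.toList)) text

-- ===== PRECONDITION & SPEC =====
def Spec_apply_severity_colors_py (text : String) (out : String) : Prop := out = apply_severity_colors_py_alt text
instance (text : String) (out : String) : Decidable (Spec_apply_severity_colors_py text out) := by unfold Spec_apply_severity_colors_py; infer_instance

-- ===== CLAIM (what is proved, stated in full; the proofs are below) =====
def Claim_equal_apply_severity_colors_py : Prop := ∀ (text : String), Dom_apply_severity_colors_py text → Spec_apply_severity_colors_py text (apply_severity_colors_py text)

-- ===== LEMMAS AND PROOFS =====

-- straightforward structural version of Python's str.replace for a nonempty pattern a :: p'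
def pvRepl (a : Char) (p' r : List Char) : List Char → List Char
  | [] => []
  | c :: t =>
    if (a :: p').isPrefixOf (c :: t) then r ++ pvRepl a p' r (List.drop p'.length t)
    else c :: pvRepl a p' r t
  termination_by cs => cs.length
  decreasing_by
  all_goals (simp; try omega)

theorem pvGo_eq (a : Char) (p' r : List Char) :
    ∀ fuel l acc, l.length ≤ fuel →
      PySem.Chars.replace.go (a :: p') r fuel l acc = acc.reverse ++ pvRepl a p' r l := by
  intro fuel
  induction fuel with
  | zero =>
    intro l acc h
    have : l = [] := List.eq_nil_of_length_eq_zero (Nat.le_zero.mp h)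
    subst this
    rw [PySem.Chars.replace.go, pvRepl]
  | succ n ih =>
    intro l acc h
    match l with
    | [] =>
      rw [PySem.Chars.replace.go, pvRepl]
      · simp
      · omega
    | c :: t =>
      rw [PySem.Chars.replace.go, pvRepl]
      by_cases hp : (a :: p').isPrefixOf (c :: t) = true
      · simp only [hp, if_true]
        rw [ih]
        · simp
        · simp at h ⊢; omega
      · simp only [hp, if_false, Bool.false_eq_true]
        rw [ih t (c :: acc) (by simp at h ⊢; omega)]
        simp

theorem pvReplace_eq (a : Char) (p' r cs : List Char) :
    PySem.Chars.replace cs (a :: p') r = pvRepl a p' r cs := by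
  rw [PySem.Chars.replace]
  simp only [List.isEmpty_cons, Bool.false_eq_true, if_false]
  exact (pvGo_eq a p' r cs.length cs [] (le_refl _)).trans (by simp)

-- replace walks untouched over a block that lacks the pattern's first character
theorem pvRepl_append (a : Char) (p' r : List Char) :
    ∀ u v, a ∉ u → pvRepl a p' r (u ++ v) = u ++ pvRepl a p' r v := by
  intro u
  induction u with
  | nil => intro v _; simp
  | cons x u' ih =>
    intro v hx
    have hne : ¬ ((a :: p').isPrefixOf (x :: (u' ++ v)) = true) := by
      simp only [List.isPrefixOf, Bool.and_eq_true, beq_iff_eq]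
      rintro ⟨rfl, -⟩
      exact hx List.mem_cons_self
    rw [List.cons_append, pvRepl, if_neg hne, ih v (fun h => hx (List.mem_cons_of_mem _ h))]
    simp

-- a '*'-free pattern is a prefix of the replaced text only if it already was one,
-- when the replacement string starts with '*'
theorem pvRepl_prefix_back (a : Char) (p' r' : List Char) :
    ∀ u q, '*' ∉ q → List.isPrefixOf q (pvRepl a p' ('*' :: r') u) = true → List.isPrefixOf q u = true := by
  intro u
  induction u with
  | nil => intro q hq h; simpa [pvRepl] using h
  | cons c t ih =>
    intro q hq h
    match q with
    | [] => simp [List.isPrefixOf]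
    | b :: q' =>
      rw [pvRepl] at h
      by_cases hp : (a :: p').isPrefixOf (c :: t) = true
      · rw [if_pos hp] at h
        simp only [List.cons_append, List.isPrefixOf, Bool.and_eq_true, beq_iff_eq] at h
        exact absurd (h.1 ▸ List.mem_cons_self) hq
      · rw [if_neg hp] at h
        simp only [List.isPrefixOf, Bool.and_eq_true, beq_iff_eq] at h ⊢
        exact ⟨h.1, ih q' (fun hm => hq (List.mem_cons_of_mem _ hm)) h.2⟩

-- the per-keyword heart: the two sequential replaces equal the fused single scan
theorem pvMain (kw colored : List Char) (hkw : '*' ∉ kw) (hcol : 'S' ∉ colored) :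
    ∀ n cs, cs.length ≤ n →
      pvRepl 'S' ("everity: ".toList ++ kw) ("Severity: ".toList ++ colored)
        (pvRepl '*' ('*' :: (kw ++ ['*', '*'])) ('*' :: '*' :: (colored ++ ['*', '*'])) cs)
      = pvScanGo kw colored cs := by
  intro n
  induction n with
  | zero =>
    intro cs h
    have : cs = [] := List.eq_nil_of_length_eq_zero (Nat.le_zero.mp h)
    subst this
    rw [pvRepl, pvRepl, pvScanGo]
  | succ n ih =>
    intro cs h
    match cs with
    | [] => rw [pvRepl, pvRepl, pvScanGo]
    | c :: t =>
      by_cases h1 : ('*' :: '*' :: (kw ++ ['*', '*'])).isPrefixOf (c :: t) = true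
      · -- bold pattern at the head
        rw [pvRepl, if_pos h1]
        have hS : 'S' ∉ '*' :: '*' :: (colored ++ ['*', '*']) := by simp [hcol]
        rw [pvRepl_append _ _ _ _ _ hS, pvScanGo, if_pos h1]
        have hdrop : List.drop ('*' :: (kw ++ ['*', '*'])).length t
            = List.drop ('*' :: '*' :: (kw ++ ['*', '*'])).length (c :: t) := by
          rw [show ('*' :: '*' :: (kw ++ ['*', '*'])).length
                = ('*' :: (kw ++ ['*', '*'])).length + 1 from rfl, List.drop_succ_cons]
        rw [hdrop, ih _ (by simp at h ⊢; omega)]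
      · by_cases h2 : ('S' :: ("everity: ".toList ++ kw)).isPrefixOf (c :: t) = true
        · -- Severity pattern at the head
          obtain ⟨t₂, ht₂⟩ := List.isPrefixOf_iff_prefix.mp h2
          rw [List.cons_append] at ht₂
          injection ht₂ with hc ht
          subst hc
          subst ht
          have hstar : '*' ∉ 'S' :: ("everity: ".toList ++ kw) := by simp [hkw]
          have E1 : pvRepl '*' ('*' :: (kw ++ ['*', '*'])) ('*' :: '*' :: (colored ++ ['*', '*']))
                ('S' :: (("everity: ".toList ++ kw) ++ t₂))
              = ('S' :: ("everity: ".toList ++ kw)) ++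
                  pvRepl '*' ('*' :: (kw ++ ['*', '*'])) ('*' :: '*' :: (colored ++ ['*', '*'])) t₂ := by
            have := pvRepl_append '*' ('*' :: (kw ++ ['*', '*'])) ('*' :: '*' :: (colored ++ ['*', '*']))
              ('S' :: ("everity: ".toList ++ kw)) t₂ hstar
            simpa using this
          rw [E1, List.cons_append, pvRepl,
            if_pos (List.isPrefixOf_iff_prefix.mpr
              ⟨pvRepl '*' ('*' :: (kw ++ ['*', '*'])) ('*' :: '*' :: (colored ++ ['*', '*'])) t₂,
                by simp⟩), List.drop_left]
          rw [pvScanGo, if_neg h1, if_pos h2]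
          have hdrop2 : List.drop ("Severity: ".toList ++ kw).length
              ('S' :: (("everity: ".toList ++ kw) ++ t₂)) = t₂ := by
            rw [show ("Severity: ".toList ++ kw).length
                  = ("everity: ".toList ++ kw).length + 1 from by simp,
                List.drop_succ_cons, List.drop_left]
          rw [hdrop2, ih _ (by simp at h ⊢; omega)]
        · -- no pattern at the head
          rw [pvRepl, if_neg h1]
          have hno : ¬ (('S' :: ("everity: ".toList ++ kw)).isPrefixOf
              (c :: pvRepl '*' ('*' :: (kw ++ ['*', '*'])) ('*' :: '*' :: (colored ++ ['*', '*'])) t) = true) := by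
            intro hcon
            simp only [List.isPrefixOf, Bool.and_eq_true, beq_iff_eq] at hcon
            have hq : '*' ∉ ("everity: ".toList ++ kw) := by simp [hkw]
            have := pvRepl_prefix_back '*' ('*' :: (kw ++ ['*', '*'])) ('*' :: (colored ++ ['*', '*'])) t
              ("everity: ".toList ++ kw) hq hcon.2
            exact h2 (by
              simp only [List.isPrefixOf, Bool.and_eq_true, beq_iff_eq]
              exact ⟨hcon.1, this⟩)
          rw [pvRepl, if_neg hno, pvScanGo, if_neg h1, if_neg h2]
          rw [ih t (by simp at h; omega)]

-- the per-keyword step at the String level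
theorem pvStep (kw colored : String) (hkw : '*' ∉ kw.toList) (hcol : 'S' ∉ colored.toList)
    (text : String) :
    PySem.Str.replace
        (PySem.Str.replace text ("**" ++ kw ++ "**") ("**" ++ colored ++ "**"))
        ("Severity: " ++ kw) ("Severity: " ++ colored)
      = String.ofList (pvScanGo kw.toList colored.toList text.toList) := by
  rw [← String.toList_inj]
  rw [PySem.Str.toList_replace, PySem.Str.toList_replace]
  have e1 : ("**" ++ kw ++ "**").toList = '*' :: ('*' :: (kw.toList ++ ['*', '*'])) := by simp
  have e2 : ("**" ++ colored ++ "**").toList = '*' :: '*' :: (colored.toList ++ ['*', '*']) := by simp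
  have e3 : ("Severity: " ++ kw).toList = 'S' :: ("everity: ".toList ++ kw.toList) := by simp
  have e4 : ("Severity: " ++ colored).toList = "Severity: ".toList ++ colored.toList := by simp
  rw [e1, e2, e3, e4, pvReplace_eq, pvReplace_eq,
    pvMain kw.toList colored.toList hkw hcol text.toList.length text.toList (le_refl _)]
  simp

-- ===== VERDICT (by name: the statement is the Claim_ definition above) =====
theorem apply_severity_colors_py_spec : Claim_equal_apply_severity_colors_py := by
  intro text _
  unfold Spec_apply_severity_colors_py
  show apply_severity_colors_py text = apply_severity_colors_py_alt text
  have hA : apply_severity_colors_py text =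
      PySem.Str.replace
        (PySem.Str.replace
          (PySem.Str.replace
            (PySem.Str.replace
              (PySem.Str.replace
                (PySem.Str.replace
                  (PySem.Str.replace
                    (PySem.Str.replace text
                      ("**" ++ "CRITICAL" ++ "**") ("**" ++ "\x1B[1m\x1B[91mCRITICAL\x1B[0m" ++ "**"))
                    ("Severity: " ++ "CRITICAL") ("Severity: " ++ "\x1B[1m\x1B[91mCRITICAL\x1B[0m"))
                  ("**" ++ "HIGH" ++ "**") ("**" ++ "\x1B[1m\x1B[93mHIGH\x1B[0m" ++ "**"))
                ("Severity: " ++ "HIGH") ("Severity: " ++ "\x1B[1m\x1B[93mHIGH\x1B[0m"))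
              ("**" ++ "MEDIUM" ++ "**") ("**" ++ "\x1B[33mMEDIUM\x1B[0m" ++ "**"))
            ("Severity: " ++ "MEDIUM") ("Severity: " ++ "\x1B[33mMEDIUM\x1B[0m"))
          ("**" ++ "LOW" ++ "**") ("**" ++ "\x1B[92mLOW\x1B[0m" ++ "**"))
        ("Severity: " ++ "LOW") ("Severity: " ++ "\x1B[92mLOW\x1B[0m") := rfl
  have hB : apply_severity_colors_py_alt text =
      String.ofList (pvScanGo "LOW".toList "\x1B[92mLOW\x1B[0m".toList
        (String.ofList (pvScanGo "MEDIUM".toList "\x1B[33mMEDIUM\x1B[0m".toList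
          (String.ofList (pvScanGo "HIGH".toList "\x1B[1m\x1B[93mHIGH\x1B[0m".toList
            (String.ofList (pvScanGo "CRITICAL".toList "\x1B[1m\x1B[91mCRITICAL\x1B[0m".toList
              text.toList)).toList)).toList)).toList) := rfl
  rw [hA, hB,
    pvStep "CRITICAL" "\x1B[1m\x1B[91mCRITICAL\x1B[0m" (by decide) (by decide),
    pvStep "HIGH" "\x1B[1m\x1B[93mHIGH\x1B[0m" (by decide) (by decide),
    pvStep "MEDIUM" "\x1B[33mMEDIUM\x1B[0m" (by decide) (by decide),
    pvStep "LOW" "\x1B[92mLOW\x1B[0m" (by decide) (by decide)]
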